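-- pv_equiv track=rewrite | github.com/akssraw/Vacha_Shield | app.py | _semantic_keyword_hit
-- ===== SOURCE A (Python) =====
-- def _semantic_keyword_hit(transcript: str) -> bool:
--     text = transcript.lower().strip()
--     phrases = [
--         "i am an ai",
--         "i'm an ai",
--         "i am a bot",
--         "i'm a bot",
--         "i am a virtual assistant",
--         "i am an artificial intelligence",
--         "this is an ai voice",
--         "this voice is generated",
--     ]
--     return any(phrase in text for phrase in phrases)
-- ===== SOURCE B (Python) =====
-- PHRASES = (
--     "i am an ai",
--     "i'm an ai",
--     "i am a bot",
--     "i'm a bot",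
--     "i am a virtual assistant",
--     "i am an artificial intelligence",
--     "this is an ai voice",
--     "this voice is generated",
-- )
--
--
-- def _semantic_keyword_hit(transcript: str) -> bool:
--     text = transcript.lower().strip()
--     # position-major scan: walk the text once and test the phrase pack at
--     # each position, instead of one full substring search per phrase
--     return any(
--         text.startswith(phrase, i)
--         for i in range(len(text) + 1)
--         for phrase in PHRASES
--     )
-- ===== Notes on version B (the rewrite author's own statement) =====
-- stated objective: alternative
-- what changed: Replaces the phrase-major loop of eight independent full substring searches by a single position-major scan of the text that tests all phrases as prefixes at each position.
import Mathlib
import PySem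

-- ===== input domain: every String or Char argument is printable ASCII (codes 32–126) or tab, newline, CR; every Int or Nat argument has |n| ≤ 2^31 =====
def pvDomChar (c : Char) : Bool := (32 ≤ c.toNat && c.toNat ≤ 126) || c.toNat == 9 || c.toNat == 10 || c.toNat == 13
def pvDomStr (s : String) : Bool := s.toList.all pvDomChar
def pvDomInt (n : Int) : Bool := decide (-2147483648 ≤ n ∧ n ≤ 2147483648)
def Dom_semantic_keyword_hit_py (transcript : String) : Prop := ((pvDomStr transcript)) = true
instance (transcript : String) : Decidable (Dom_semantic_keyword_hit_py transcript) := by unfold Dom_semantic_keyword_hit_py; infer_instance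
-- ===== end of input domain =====

-- B replaces eight independent substring scans by one position-major scan testing all phrases at each position (alternative structure, same cost).


-- ===== PORT A =====
def semantic_keyword_hit_py (transcript : String) : Bool :=
  let text := PySem.Str.strip (PySem.Str.lower transcript)
  let phrases : List String :=
    ["i am an ai", "i'm an ai", "i am a bot", "i'm a bot",
     "i am a virtual assistant", "i am an artificial intelligence",
     "this is an ai voice", "this voice is generated"]
  phrases.any (fun phrase => PySem.Str.isIn phrase text)

-- ===== PORT B =====
def pvPhrases : List (List Char) :=
  ["i am an ai", "i'm an ai", "i am a bot", "i'm a bot",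
   "i am a virtual assistant", "i am an artificial intelligence",
   "this is an ai voice", "this voice is generated"].map String.toList

-- position-major scan: at each suffix of the text, test every phrase as a prefix
def pvScan (phrases : List (List Char)) : List Char → Bool
  | [] => phrases.any (fun p => p.isPrefixOf ([] : List Char))
  | c :: rest => phrases.any (fun p => p.isPrefixOf (c :: rest)) || pvScan phrases rest

def semantic_keyword_hit_py_alt (transcript : String) : Bool :=
  let text := PySem.Str.strip (PySem.Str.lower transcript)
  pvScan pvPhrases text.toList

-- ===== PRECONDITION & SPEC =====
def Spec_semantic_keyword_hit_py (transcript : String) (out : Bool) : Prop := out = semantic_keyword_hit_py_alt transcript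
instance (transcript : String) (out : Bool) : Decidable (Spec_semantic_keyword_hit_py transcript out) := by unfold Spec_semantic_keyword_hit_py; infer_instance

-- ===== CLAIM (what is proved, stated in full; the proofs are below) =====
def Claim_equal_semantic_keyword_hit_py : Prop := ∀ (transcript : String), Dom_semantic_keyword_hit_py transcript → Spec_semantic_keyword_hit_py transcript (semantic_keyword_hit_py transcript)

-- ===== LEMMAS AND PROOFS =====

theorem pvScan_iff (ps : List (List Char)) (l : List Char) :
    pvScan ps l = true ↔ ∃ p ∈ ps, ∃ j, p <+: l.drop j := by
  induction l with
  | nil =>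
    simp [pvScan, List.any_eq_true, List.isPrefixOf_iff_prefix]
  | cons c rest ih =>
    simp only [pvScan, Bool.or_eq_true, List.any_eq_true, List.isPrefixOf_iff_prefix, ih]
    constructor
    · rintro (⟨p, hp, hpre⟩ | ⟨p, hp, j, hpre⟩)
      · exact ⟨p, hp, 0, by simpa using hpre⟩
      · exact ⟨p, hp, j + 1, by simpa using hpre⟩
    · rintro ⟨p, hp, j, hpre⟩
      cases j with
      | zero => exact Or.inl ⟨p, hp, by simpa using hpre⟩
      | succ j => exact Or.inr ⟨p, hp, j, by simpa using hpre⟩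

theorem pvScan_eq_any_isIn (ps : List (List Char)) (l : List Char) :
    pvScan ps l = ps.any (fun p => PySem.Chars.isIn p l) := by
  rw [Bool.eq_iff_iff, pvScan_iff, List.any_eq_true]
  constructor
  · rintro ⟨p, hp, j, hpre⟩
    exact ⟨p, hp, (PySem.Chars.exists_prefix_drop_iff_isIn p l).1 ⟨j, hpre⟩⟩
  · rintro ⟨p, hp, hin⟩
    obtain ⟨j, hpre⟩ := (PySem.Chars.exists_prefix_drop_iff_isIn p l).2 hin
    exact ⟨p, hp, j, hpre⟩

-- ===== VERDICT (by name: the statement is the Claim_ definition above) =====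
theorem semantic_keyword_hit_py_spec : Claim_equal_semantic_keyword_hit_py := by
  intro transcript _
  unfold Spec_semantic_keyword_hit_py semantic_keyword_hit_py semantic_keyword_hit_py_alt
  rw [pvScan_eq_any_isIn]
  simp [pvPhrases, PySem.Str.isIn_eq]
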